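-- pv_equiv track=rewrite | github.com/josiney-souza/ufpr-topicos-redes | confs_comuns.py | alterar
-- ===== SOURCE A (Python) =====
-- def alterar (dados):
-- 	pos = 0
-- 	str_alterada = ""
--
-- 	for pos in range(len(dados)):
-- 		if (pos == 1 or pos == 3 or pos == 5 or pos == 7 or pos == 9):
-- 			str_alterada = str_alterada + "5"
-- 		else:
-- 			str_alterada = str_alterada + dados[pos]
--
-- 	return str_alterada
-- ===== SOURCE B (Python) =====
-- def alterar(dados):
--     result = list(dados)
--     for i in (1, 3, 5, 7, 9):
--         if i < len(result):
--             result[i] = '5'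
--     return ''.join(result)
-- ===== Notes on version B (the rewrite author's own statement) =====
-- stated objective: simpler
-- what changed: A rebuilds the whole string character by character with a per-position branch (quadratic concatenation); B copies the input once and patches only the fixed indices 1,3,5,7,9 (guarded by length), removing the branching scan.
import Mathlib
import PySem

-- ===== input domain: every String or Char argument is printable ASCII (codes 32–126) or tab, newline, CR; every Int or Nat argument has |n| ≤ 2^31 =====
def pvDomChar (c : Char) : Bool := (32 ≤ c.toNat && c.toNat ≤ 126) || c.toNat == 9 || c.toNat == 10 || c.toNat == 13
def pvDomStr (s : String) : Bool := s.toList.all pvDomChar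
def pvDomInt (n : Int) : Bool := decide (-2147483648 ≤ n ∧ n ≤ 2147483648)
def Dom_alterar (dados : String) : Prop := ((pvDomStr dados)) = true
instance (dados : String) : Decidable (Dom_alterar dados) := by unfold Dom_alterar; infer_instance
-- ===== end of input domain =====

-- B replaces A's per-character branching rebuild of the whole string by a copy of the
-- input patched at the fixed indices 1,3,5,7,9 (each guarded by the length); objective: simpler.

-- ===== PORT A =====
-- A scans pos over range(len(dados)) and appends either "5" or dados[pos] to an accumulator string.
def alterar (dados : String) : String :=
  String.ofList ((PySem.List.pyRange 0 (PySem.Str.len dados) 1).foldl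
    (fun acc pos =>
      if pos = 1 ∨ pos = 3 ∨ pos = 5 ∨ pos = 7 ∨ pos = 9 then acc ++ ['5']
      else acc ++ [PySem.List.pyGetD dados.toList pos ' ']) [])

-- ===== PORT B =====
-- result[i] = '5' guarded by i < len(result)
def patch5 (cs : List Char) (i : Nat) : List Char :=
  if i < cs.length then cs.set i '5' else cs

def alterar_alt (dados : String) : String :=
  String.ofList ([1, 3, 5, 7, 9].foldl patch5 dados.toList)

-- ===== PRECONDITION & SPEC =====
def Spec_alterar (dados : String) (out : String) : Prop := out = alterar_alt dados
instance (dados : String) (out : String) : Decidable (Spec_alterar dados out) := by unfold Spec_alterar; infer_instance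

-- ===== CLAIM (what is proved, stated in full; the proofs are below) =====
def Claim_equal_alterar : Prop := ∀ (dados : String), Dom_alterar dados → Spec_alterar dados (alterar dados)

-- ===== LEMMAS AND PROOFS =====

theorem patch5_length (cs : List Char) (i : Nat) : (patch5 cs i).length = cs.length := by
  unfold patch5; split <;> simp

theorem patch5_getElem? (cs : List Char) (i k : Nat) :
    (patch5 cs i)[k]? = if k = i ∧ i < cs.length then some '5' else cs[k]? := by
  unfold patch5
  split_ifs with h hk hk2
  · obtain ⟨rfl, _⟩ := hk
    exact List.getElem?_set_self h
  · rw [List.getElem?_set_ne]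
    intro hik; exact hk ⟨hik.symm, h⟩
  · exact absurd hk2.2 h
  · rfl

theorem alterar_eq (dados : String) : alterar dados = alterar_alt dados := by
  unfold alterar alterar_alt
  refine congrArg String.ofList ?_
  set cs := dados.toList with hcs
  rw [PySem.Str.len_eq, ← hcs, PySem.List.pyRange_zero_natCast]
  have hfun : (fun (acc : List Char) (pos : Int) =>
      if pos = 1 ∨ pos = 3 ∨ pos = 5 ∨ pos = 7 ∨ pos = 9 then acc ++ ['5']
      else acc ++ [PySem.List.pyGetD cs pos ' ']) =
      (fun acc pos => acc ++ [if pos = 1 ∨ pos = 3 ∨ pos = 5 ∨ pos = 7 ∨ pos = 9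
        then '5' else PySem.List.pyGetD cs pos ' ']) := by
    funext acc pos; split <;> rfl
  rw [hfun, PySem.List.foldl_append_singleton_eq_map, List.nil_append, List.map_map]
  simp only [List.foldl]
  apply List.ext_getElem?
  intro k
  rw [List.getElem?_map]
  simp only [patch5_getElem?, patch5_length]
  by_cases hk : k < cs.length
  · rw [List.getElem?_range hk]
    simp only [Option.map_some, Function.comp]
    have hget : cs[k]? = some cs[k] := List.getElem?_eq_getElem hk
    by_cases h1 : k = 1
    · subst h1; simp [hk]
    by_cases h3 : k = 3
    · subst h3; simp [hk]
    by_cases h5 : k = 5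
    · subst h5; simp [hk]
    by_cases h7 : k = 7
    · subst h7; simp [hk]
    by_cases h9 : k = 9
    · subst h9; simp [hk]
    · have hcond : ¬ ((k:Int) = 1 ∨ (k:Int) = 3 ∨ (k:Int) = 5 ∨ (k:Int) = 7 ∨ (k:Int) = 9) := by
        omega
      rw [if_neg hcond]
      simp [h1, h3, h5, h7, h9, hget, List.getD_eq_getElem?_getD]
  · rw [List.getElem?_eq_none (by simpa using hk)]
    have hnone : cs[k]? = none := List.getElem?_eq_none (by omega)
    rw [if_neg (by omega), if_neg (by omega), if_neg (by omega), if_neg (by omega),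
        if_neg (by omega), hnone]
    rfl

-- ===== VERDICT (by name: the statement is the Claim_ definition above) =====
theorem alterar_spec : Claim_equal_alterar := by
  intro dados _
  exact alterar_eq dados
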